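-- pv_equiv track=rewrite | github.com/software-students-fall2022/python-package-exercise-project-3-team-7 | src/piglatin/print_bubble.py | speech_bubble
-- ===== SOURCE A (Python) =====
-- def speech_bubble(message):
--     result = "\n"
--     words = message.split(" ")
--
--     lines = []
--
--     words_per_line = 7
--     line = ""
--     max_lines = 0
--     for i in range(len(words)):
--         # append the current line to lines if max number of words in line is reached
--         if (i % words_per_line == 0 and i != 0):
--             lines.append(line)
--             line = ""
--
--         # if new line, start without a space
--         if i % words_per_line != 0:
--             line += " " + words[i]
--         else:
--             line += words[i]
--
--         # if (i == len(words) - 1 and i % words_per_line != 0):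
--         if (i == len(words) - 1):
--             lines.append(line)
--
--     for i in range(len(lines)):
--         if len(lines[i]) > max_lines:
--             max_lines = len(lines[i])
--
--     result += " " + "-" * max_lines + "\n"
--     for i in range(len(lines)):
--         result += "(" + lines[i] + " " * (max_lines - len(lines[i])) + ")" + "\n"
--     result += " " + "-" * max_lines
--
--     return result
-- ===== SOURCE B (Python) =====
-- def speech_bubble(message):
--     words = message.split(" ")
--     lines = [" ".join(words[i:i+7]) for i in range(0, len(words), 7)]
--     width = max(len(l) for l in lines)
--     body = "".join("(" + l + " " * (width - len(l)) + ")" + "\n" for l in lines)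
--     return "\n" + " " + "-" * width + "\n" + body + " " + "-" * width
-- ===== Notes on version B (the rewrite author's own statement) =====
-- stated objective: simpler
-- what changed: Replaces the word-by-word accumulator loop with modulo flush tests and a last-iteration special case by slicing the word list into chunks of 7 joined with spaces, and replaces the index loops for the maximum and the body by max() over the line lengths and a single join over the lines.
import Mathlib
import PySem

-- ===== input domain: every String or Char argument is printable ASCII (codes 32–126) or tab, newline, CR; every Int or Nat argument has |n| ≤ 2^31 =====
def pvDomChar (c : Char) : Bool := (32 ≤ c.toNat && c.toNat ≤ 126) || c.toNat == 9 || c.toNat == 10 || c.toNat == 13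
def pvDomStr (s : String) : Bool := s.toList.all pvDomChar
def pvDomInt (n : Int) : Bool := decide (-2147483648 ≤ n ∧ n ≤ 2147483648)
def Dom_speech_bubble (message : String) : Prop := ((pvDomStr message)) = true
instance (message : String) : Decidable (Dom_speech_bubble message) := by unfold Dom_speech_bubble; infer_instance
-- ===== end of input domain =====

-- B is simpler: it slices the word list into chunks of 7 joined with spaces instead of
-- A's word-by-word accumulation with modulo flush tests and a last-iteration special case.

-- ===== PORT A =====
-- loop body of A's first for-loop, taken out as a named helper (p = (i, words[i]))
def stepA (n : Int) (st : List String × String) (p : Int × String) : List String × String :=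
  let st1 := if PySem.Int.mod p.1 7 = 0 ∧ p.1 ≠ 0 then (st.1 ++ [st.2], "") else st
  let line := if PySem.Int.mod p.1 7 ≠ 0 then st1.2 ++ " " ++ p.2 else st1.2 ++ p.2
  (if p.1 = n - 1 then st1.1 ++ [line] else st1.1, line)

def speech_bubble (message : String) : String :=
  -- words = message.split(" "): sep ≠ "" so split? is always `some`; getD is never the default
  let words := (PySem.Str.split? message " ").getD []
  let n : Int := PySem.List.len words
  let st := (PySem.List.pyRange 0 n 1).foldl
      (fun st i => stepA n st (i, PySem.List.pyGetD words i "")) (([] : List String), "")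
  let lines := st.1
  let max_lines := (PySem.List.pyRange 0 (PySem.List.len lines) 1).foldl (fun m i =>
      if PySem.Str.len (PySem.List.pyGetD lines i "") > m
      then PySem.Str.len (PySem.List.pyGetD lines i "") else m) (0 : Int)
  -- "-" * max_lines ported by hand as a replicate (exact: Python's str * int, negative gives "")
  let result := "\n" ++ (" " ++ String.ofList (List.replicate max_lines.toNat '-') ++ "\n")
  let result := (PySem.List.pyRange 0 (PySem.List.len lines) 1).foldl (fun r i =>
      r ++ ("(" ++ PySem.List.pyGetD lines i ""
        ++ String.ofList (List.replicate (max_lines - PySem.Str.len (PySem.List.pyGetD lines i "")).toNat ' ')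
        ++ ")" ++ "\n")) result
  result ++ (" " ++ String.ofList (List.replicate max_lines.toNat '-'))

-- ===== PORT B =====
-- lines = [" ".join(words[i:i+7]) for i in range(0, len(words), 7)] as structural recursion on 7-chunks
def chunkLines : List String → List String
  | [] => []
  | w :: rest => PySem.Str.join " " (w :: rest.take 6) :: chunkLines (rest.drop 6)
termination_by ws => ws.length
decreasing_by simp

def speech_bubble_alt (message : String) : String :=
  let words := (PySem.Str.split? message " ").getD []
  let lines := chunkLines words
  -- width = max(len(l) for l in lines): lines is nonempty whenever words is, so getD is never the default
  let width := (PySem.List.max? (lines.map PySem.Str.len) (fun y => y)).getD 0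
  let dash := String.ofList (List.replicate width.toNat '-')
  let body := PySem.Str.join "" (lines.map (fun l =>
      "(" ++ l ++ String.ofList (List.replicate (width - PySem.Str.len l).toNat ' ') ++ ")" ++ "\n"))
  "\n" ++ " " ++ dash ++ "\n" ++ body ++ " " ++ dash

-- ===== PRECONDITION & SPEC =====
def Spec_speech_bubble (message : String) (out : String) : Prop := out = speech_bubble_alt message
instance (message : String) (out : String) : Decidable (Spec_speech_bubble message out) := by unfold Spec_speech_bubble; infer_instance

-- ===== CLAIM (what is proved, stated in full; the proofs are below) =====
def Claim_equal_speech_bubble : Prop := ∀ (message : String), Dom_speech_bubble message → Spec_speech_bubble message (speech_bubble message)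

-- ===== LEMMAS AND PROOFS =====

theorem mod7_zero_iff (i : Int) : PySem.Int.mod i 7 = 0 ↔ (7 : Int) ∣ i :=
  PySem.Int.mod_eq_zero_iff_dvd i 7

-- " ".join(w :: rest) is the running accumulation A performs inside one chunk
theorem join_space_foldl (rest : List String) (w : String) :
    PySem.Str.join " " (w :: rest) = rest.foldl (fun s t => s ++ " " ++ t) w := by
  induction rest generalizing w with
  | nil =>
    apply String.toList_inj.mp
    simp [PySem.Str.toList_join, PySem.Chars.join_singleton]
  | cons t ts ih =>
    rw [List.foldl_cons, ← ih (w ++ " " ++ t)]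
    apply String.toList_inj.mp
    cases ts with
    | nil => simp [PySem.Str.toList_join, PySem.Chars.join_singleton, PySem.Chars.join_cons_cons]
    | cons u us => simp [PySem.Str.toList_join, PySem.Chars.join_cons_cons]

-- chunk tail, no flush, no last-element append
theorem foldTail_mid (n : Int) (ts : List String) (j : Int) (lines : List String) (cur : String)
    (hnd : ∀ i : Int, j ≤ i → i < j + (ts.length : Int) → ¬ (7 : Int) ∣ i)
    (hlast : ∀ i : Int, j ≤ i → i < j + (ts.length : Int) → i ≠ n - 1) :
    (PySem.List.enumerate ts j).foldl (stepA n) (lines, cur)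
      = (lines, ts.foldl (fun s t => s ++ " " ++ t) cur) := by
  induction ts generalizing j cur with
  | nil => simp [PySem.List.enumerate]
  | cons t ts ih =>
    have h7 : ¬ (7 : Int) ∣ j := hnd j le_rfl (by push_cast [List.length_cons, List.length_nil]; omega)
    have hm : PySem.Int.mod j 7 ≠ 0 := fun h => h7 ((mod7_zero_iff j).mp h)
    have hj : j ≠ n - 1 := hlast j le_rfl (by push_cast [List.length_cons, List.length_nil]; omega)
    rw [PySem.List.enumerate_cons, List.foldl_cons]
    rw [show stepA n (lines, cur) (j, t) = (lines, cur ++ " " ++ t) by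
      simp [stepA, h7, hj]]
    rw [List.foldl_cons]
    exact ih (j + 1) (cur ++ " " ++ t)
      (fun i h1 h2 => hnd i (by omega) (by push_cast [List.length_cons, List.length_nil] at h2 ⊢; omega))
      (fun i h1 h2 => hlast i (by omega) (by push_cast [List.length_cons, List.length_nil] at h2 ⊢; omega))

-- chunk tail ending exactly at the last word: the accumulated line is appended
theorem foldTail_last (n : Int) (ts : List String) (j : Int) (lines : List String) (cur : String)
    (hne : ts ≠ [])
    (hnd : ∀ i : Int, j ≤ i → i < j + (ts.length : Int) → ¬ (7 : Int) ∣ i)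
    (hend : j + (ts.length : Int) = n) :
    (PySem.List.enumerate ts j).foldl (stepA n) (lines, cur)
      = (lines ++ [ts.foldl (fun s t => s ++ " " ++ t) cur],
         ts.foldl (fun s t => s ++ " " ++ t) cur) := by
  induction ts generalizing j cur with
  | nil => exact absurd rfl hne
  | cons t ts ih =>
    have h7 : ¬ (7 : Int) ∣ j := hnd j le_rfl (by push_cast [List.length_cons, List.length_nil]; omega)
    have hm : PySem.Int.mod j 7 ≠ 0 := fun h => h7 ((mod7_zero_iff j).mp h)
    rw [PySem.List.enumerate_cons, List.foldl_cons]
    cases ts with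
    | nil =>
      have hj : j = n - 1 := by push_cast [List.length_cons, List.length_nil] at hend; omega
      subst hj
      simp [stepA, h7, PySem.List.enumerate]
    | cons u us =>
      have hj : j ≠ n - 1 := by push_cast [List.length_cons, List.length_nil] at hend; omega
      rw [show stepA n (lines, cur) (j, t) = (lines, cur ++ " " ++ t) by
        simp [stepA, h7, hj]]
      rw [List.foldl_cons]
      exact ih (j + 1) (cur ++ " " ++ t) (List.cons_ne_nil u us)
        (fun i h1 h2 => hnd i (by omega) (by push_cast [List.length_cons, List.length_nil] at h2 ⊢; omega))
        (by push_cast [List.length_cons, List.length_nil] at hend ⊢; omega)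

-- main invariant: A's loop produces exactly the 7-chunks of the remaining words
theorem loop_chunks (m : Nat) (n : Int) : ∀ (ws : List String) (k : Int) (lines : List String) (cur : String),
    ws.length ≤ m → (7 : Int) ∣ k → 0 ≤ k → (k = 0 → cur = "") → (ws = [] → k = 0) →
    k + ws.length = n →
    ((PySem.List.enumerate ws k).foldl (stepA n) (lines, cur)).1
      = lines ++ (if k = 0 then [] else [cur]) ++ chunkLines ws := by
  induction m generalizing n with
  | zero =>
    intro ws k lines cur hlen hdvd hknn hcur hwsk hn
    have hws : ws = [] := List.length_eq_zero_iff.mp (Nat.le_zero.mp hlen)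
    subst hws
    simp [hwsk rfl, PySem.List.enumerate, chunkLines]
  | succ m ih =>
    intro ws k lines cur hlen hdvd hknn hcur hwsk hn
    cases ws with
    | nil => simp [hwsk rfl, PySem.List.enumerate, chunkLines]
    | cons w rest =>
      have hk7 : PySem.Int.mod k 7 = 0 := (mod7_zero_iff k).mpr hdvd
      have hhead : stepA n (lines, cur) (k, w)
          = (if k = n - 1 then (lines ++ (if k = 0 then [] else [cur])) ++ [w]
             else lines ++ (if k = 0 then [] else [cur]), w) := by
        by_cases hk0 : k = 0
        · subst hk0
          simp [stepA, hcur rfl]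
        · simp [stepA, hk0, hdvd]
      rw [PySem.List.enumerate_cons, List.foldl_cons, hhead]
      by_cases hrest : rest = []
      · subst hrest
        have hkn : k = n - 1 := by push_cast [List.length_cons, List.length_nil] at hn; omega
        simp [hkn, PySem.List.enumerate, chunkLines, join_space_foldl]
      · have hrl : 1 ≤ rest.length := List.length_pos_iff.mpr hrest
        have hkn : k ≠ n - 1 := by push_cast [List.length_cons, List.length_nil] at hn; omega
        rw [if_neg hkn]
        obtain ⟨c, hc⟩ := hdvd
        by_cases hlen6 : rest.length ≤ 6
        · have hdrop : rest.drop 6 = [] := List.drop_eq_nil_of_le hlen6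
          rw [foldTail_last n rest (k + 1) _ w hrest
            (by intro i h1 h2 ⟨e, he⟩; omega)
            (by push_cast [List.length_cons, List.length_nil] at hn ⊢; omega)]
          simp [chunkLines, hdrop, List.take_of_length_le hlen6, join_space_foldl]
        · have htl : (rest.take 6).length = 6 := by rw [List.length_take]; omega
          have hsplit : PySem.List.enumerate rest (k + 1)
              = PySem.List.enumerate (rest.take 6) (k + 1)
                ++ PySem.List.enumerate (rest.drop 6) (k + 7) := by
            have h67 : k + 1 + ((rest.take 6).length : Int) = k + 7 := by
              rw [htl]; norm_num; omega
            conv_lhs => rw [← List.take_append_drop 6 rest]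
            rw [PySem.List.enumerate_append, h67]
          rw [hsplit, List.foldl_append]
          rw [foldTail_mid n (rest.take 6) (k + 1) _ w
            (by intro i h1 h2; rw [htl] at h2
                intro ⟨e, he⟩; push_cast at h2; omega)
            (by intro i h1 h2; rw [htl] at h2
                push_cast [List.length_cons, List.length_nil] at hn h2; omega)]
          rw [← join_space_foldl]
          rw [ih n (rest.drop 6) (k + 7) _ _
            (by simp at hlen ⊢; omega)
            ⟨c + 1, by omega⟩
            (by omega)
            (fun h => absurd h (by omega))
            (fun h => absurd (List.drop_eq_nil_iff.mp h) (by omega))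
            (by push_cast [List.length_cons, List.length_nil, List.length_drop] at hn ⊢; omega)]
          rw [if_neg (by omega : ¬ k + 7 = 0)]
          simp [chunkLines]

-- A's running-max loop equals max(len(l) for l in lines)
theorem max_eq (lines : List String) :
    lines.foldl (fun m l => if PySem.Str.len l > m then PySem.Str.len l else m) (0 : Int)
      = (PySem.List.max? (lines.map PySem.Str.len) (fun y => y)).getD 0 := by
  have hg : ∀ (m : Int) (l : String),
      (if PySem.Str.len l > m then PySem.Str.len l else m) = max m (PySem.Str.len l) := by
    intro m l; rw [max_def]; split_ifs <;> omega
  cases lines with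
  | nil => simp [PySem.List.max?]
  | cons x t =>
    rw [List.map_cons, PySem.List.max?_id_cons, Option.getD_some]
    simp only [List.foldl_cons, hg]
    rw [show max 0 (PySem.Str.len x) = PySem.Str.len x from
      max_eq_right (by simp [PySem.Str.len_eq])]
    rw [List.foldl_map]

-- A's body-building loop equals "".join of the per-line strings
theorem join_empty_cons (x : String) (rest : List String) :
    PySem.Str.join "" (x :: rest) = x ++ PySem.Str.join "" rest := by
  apply String.toList_inj.mp
  cases rest with
  | nil => simp [PySem.Str.toList_join, PySem.Chars.join_singleton, PySem.Chars.join_nil]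
  | cons b bs => simp [PySem.Str.toList_join, PySem.Chars.join_cons_cons]

theorem foldl_append_join (f : String → String) (ls : List String) (s : String) :
    ls.foldl (fun acc l => acc ++ f l) s = s ++ PySem.Str.join "" (ls.map f) := by
  induction ls generalizing s with
  | nil =>
    apply String.toList_inj.mp
    simp [PySem.Str.toList_join, PySem.Chars.join_nil]
  | cons a as ih =>
    rw [List.foldl_cons, ih, List.map_cons, join_empty_cons]
    apply String.toList_inj.mp
    simp

-- ===== VERDICT (by name: the statement is the Claim_ definition above) =====
theorem speech_bubble_spec : Claim_equal_speech_bubble := by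
  intro message _
  show speech_bubble message = speech_bubble_alt message
  simp only [speech_bubble, speech_bubble_alt]
  have hlines : ∀ (words : List String),
      ((PySem.List.pyRange 0 (PySem.List.len words) 1).foldl
        (fun st i => stepA (PySem.List.len words) st (i, PySem.List.pyGetD words i ""))
        (([] : List String), "")).1 = chunkLines words := by
    intro words
    rw [← List.foldl_map, ← PySem.List.enumerate_eq_map_pyRange words ""]
    rw [loop_chunks words.length (PySem.List.len words) words 0 [] "" le_rfl ⟨0, by ring⟩
      le_rfl (fun _ => rfl) (fun _ => rfl) (by simp [PySem.List.len_eq])]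
    simp
  rw [hlines]
  rw [PySem.List.foldl_pyRange_zero_pyGetD
    (chunkLines ((PySem.Str.split? message " ").getD [])) ""
    (fun m l => if PySem.Str.len l > m then PySem.Str.len l else m) 0]
  rw [max_eq]
  rw [PySem.List.foldl_pyRange_zero_pyGetD
    (chunkLines ((PySem.Str.split? message " ").getD [])) ""
    (fun r l => r ++ ("(" ++ l
      ++ String.ofList (List.replicate ((PySem.List.max?
            ((chunkLines ((PySem.Str.split? message " ").getD [])).map PySem.Str.len)
            (fun y => y)).getD 0 - PySem.Str.len l).toNat ' ')
      ++ ")" ++ "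
"))]
  rw [foldl_append_join]
  simp only [String.append_assoc]
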